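-- pv_equiv track=rewrite | github.com/Kai124816/Class-Encore-Winter | week_7/bugs.py | smallest_each
-- ===== SOURCE A (Python) =====
-- def smallest_each(li: list[tuple[str, int]]) -> list[tuple[str, int]]:
--     smallest_dict = {}
--     for pair in li:
--         if pair[0] not in smallest_dict.keys():
--             smallest_dict[pair[0]] = pair[1]
--         elif pair[1] > smallest_dict[pair[0]]:
--             smallest_dict[pair[0]] = pair[1]
--     return list(smallest_dict.items())[::-1]
-- ===== SOURCE B (Python) =====
-- def smallest_each(li: list[tuple[str, int]]) -> list[tuple[str, int]]:
--     keys = []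
--     for k, _ in li:
--         if k not in keys:
--             keys.append(k)
--     return [(k, max(v for kk, v in li if kk == k)) for k in keys][::-1]
-- ===== Notes on version B (the rewrite author's own statement) =====
-- stated objective: alternative
-- what changed: Replaces the single-pass dict aggregation with a distinct-keys-in-first-appearance-order pass followed by a full rescan of the list per key to take max, reversed at the end.
import Mathlib
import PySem

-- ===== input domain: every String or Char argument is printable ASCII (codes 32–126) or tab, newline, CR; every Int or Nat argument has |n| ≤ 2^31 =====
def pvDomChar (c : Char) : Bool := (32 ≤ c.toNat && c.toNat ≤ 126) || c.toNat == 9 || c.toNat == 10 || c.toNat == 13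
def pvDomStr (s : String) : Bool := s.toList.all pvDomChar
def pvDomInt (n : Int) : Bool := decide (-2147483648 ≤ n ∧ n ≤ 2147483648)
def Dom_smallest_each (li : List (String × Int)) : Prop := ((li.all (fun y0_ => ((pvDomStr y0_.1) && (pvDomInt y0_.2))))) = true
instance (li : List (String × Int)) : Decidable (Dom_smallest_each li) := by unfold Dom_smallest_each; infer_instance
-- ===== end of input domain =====

-- B replaces A's single-pass dict aggregation by a distinct-keys pass plus a per-key rescan for the max (alternative decomposition, same results).


-- ===== PORT A =====
-- one dict-update step of A's loop; getD's default 0 is unreachable (guarded by contains)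
def smallest_each_step (d : PySem.Dict String Int) (pair : String × Int) : PySem.Dict String Int :=
  if ¬ d.contains pair.1 then d.insert pair.1 pair.2
  else if pair.2 > d.getD pair.1 0 then d.insert pair.1 pair.2
  else d

def smallest_each (li : List (String × Int)) : List (String × Int) :=
  ((PySem.List.slice? (li.foldl smallest_each_step PySem.Dict.empty).items none none (-1)).getD [])

-- ===== PORT B =====
def smallest_each_keys (li : List (String × Int)) : List String :=
  li.foldl (fun keys p => if p.1 ∈ keys then keys else keys ++ [p.1]) []

-- max(v for kk, v in li if kk == k); the [] branch is unreachable for k drawn from li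
def smallest_each_max (li : List (String × Int)) (k : String) : Int :=
  match (li.filter (fun p => p.1 == k)).map (·.2) with
  | [] => 0
  | h :: t => t.foldl max h

def smallest_each_alt (li : List (String × Int)) : List (String × Int) :=
  ((smallest_each_keys li).map (fun k => (k, smallest_each_max li k))).reverse

-- ===== PRECONDITION & SPEC =====
def Spec_smallest_each (li : List (String × Int)) (out : List (String × Int)) : Prop := out = smallest_each_alt li
instance (li : List (String × Int)) (out : List (String × Int)) : Decidable (Spec_smallest_each li out) := by unfold Spec_smallest_each; infer_instance

-- ===== CLAIM (what is proved, stated in full; the proofs are below) =====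
def Claim_equal_smallest_each : Prop := ∀ (li : List (String × Int)), Dom_smallest_each li → Spec_smallest_each li (smallest_each li)

-- ===== LEMMAS AND PROOFS =====

theorem keys_snoc (li : List (String × Int)) (p : String × Int) :
    smallest_each_keys (li ++ [p]) =
      (if p.1 ∈ smallest_each_keys li then smallest_each_keys li
       else smallest_each_keys li ++ [p.1]) := by
  simp [smallest_each_keys, List.foldl_append]

theorem keys_nodup (li : List (String × Int)) : (smallest_each_keys li).Nodup := by
  induction li using List.reverseRecOn with
  | nil => simp [smallest_each_keys]
  | append_singleton li p ih =>
    rw [keys_snoc]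
    split_ifs with h
    · exact ih
    · simpa [List.nodup_append] using ⟨ih, fun a ha he => h (he ▸ ha)⟩

theorem mem_keys_iff (li : List (String × Int)) (k : String) :
    k ∈ smallest_each_keys li ↔ ∃ q ∈ li, q.1 = k := by
  induction li using List.reverseRecOn with
  | nil => simp [smallest_each_keys]
  | append_singleton li p ih =>
    rw [keys_snoc]
    split_ifs with h
    · constructor
      · intro hm
        rcases ih.1 hm with ⟨q, hq, hq1⟩
        exact ⟨q, by simp [hq], hq1⟩
      · rintro ⟨q, hq, hq1⟩
        rcases List.mem_append.1 hq with h1 | h1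
        · exact ih.2 ⟨q, h1, hq1⟩
        · have : q = p := by simpa using h1
          subst this; exact hq1 ▸ h
    · constructor
      · intro hm
        rcases List.mem_append.1 hm with h1 | h1
        · rcases ih.1 h1 with ⟨q, hq, hq1⟩
          exact ⟨q, by simp [hq], hq1⟩
        · have : k = p.1 := by simpa using h1
          exact ⟨p, by simp, this.symm⟩
      · rintro ⟨q, hq, hq1⟩
        rcases List.mem_append.1 hq with h1 | h1
        · exact List.mem_append.2 (Or.inl (ih.2 ⟨q, h1, hq1⟩))
        · have : q = p := by simpa using h1
          subst this
          exact List.mem_append.2 (Or.inr (by simp [hq1]))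

theorem max_snoc (li : List (String × Int)) (p : String × Int) (k : String) :
    smallest_each_max (li ++ [p]) k =
      (if p.1 = k then
         (if (li.filter (fun q => q.1 == k)) = [] then p.2
          else max (smallest_each_max li k) p.2)
       else smallest_each_max li k) := by
  by_cases hk : p.1 = k
  · simp only [smallest_each_max, List.filter_append, List.map_append, hk, if_pos]
    cases hfe : li.filter (fun q => q.1 == k) with
    | nil => simp [hk]
    | cons q t =>
      simp only [List.filter_cons, hk]
      simp [List.foldl_append]
  · simp [smallest_each_max, List.filter_append, hk]

theorem main_items (li : List (String × Int)) :
    (li.foldl smallest_each_step PySem.Dict.empty).items =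
      (smallest_each_keys li).map (fun k => (k, smallest_each_max li k)) := by
  induction li using List.reverseRecOn with
  | nil => simp [smallest_each_keys]; rfl
  | append_singleton li p ih =>
    have hkeys : (li.foldl smallest_each_step PySem.Dict.empty).keys = smallest_each_keys li := by
      simp [PySem.Dict.keys, ih, Function.comp_def]
    have hnd : (li.foldl smallest_each_step PySem.Dict.empty).keys.Nodup := by
      rw [hkeys]; exact keys_nodup li
    have hcont : (li.foldl smallest_each_step PySem.Dict.empty).contains p.1
        = decide (p.1 ∈ smallest_each_keys li) := by
      rw [PySem.Dict.contains_eq_decide_mem_keys, hkeys]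
    rw [List.foldl_append, List.foldl_cons, List.foldl_nil, keys_snoc]
    by_cases hmem : p.1 ∈ smallest_each_keys li
    · -- key already present
      have hcont' : (li.foldl smallest_each_step PySem.Dict.empty).contains p.1 = true := by
        simp [hcont, hmem]
      have hitem : (p.1, smallest_each_max li p.1)
          ∈ (li.foldl smallest_each_step PySem.Dict.empty).items := by
        rw [ih]; exact List.mem_map.2 ⟨p.1, hmem, rfl⟩
      have hgetD : (li.foldl smallest_each_step PySem.Dict.empty).getD p.1 0
          = smallest_each_max li p.1 :=
        PySem.Dict.getD_of_mem_items _ hitem hnd 0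
      have hfilter : (li.filter (fun q => q.1 == p.1)) ≠ [] := by
        rcases (mem_keys_iff li p.1).1 hmem with ⟨q, hq, hq1⟩
        intro hc
        have := (List.filter_eq_nil_iff.1 hc) q hq
        simp [hq1] at this
      have hmax : smallest_each_max (li ++ [p]) p.1
          = max (smallest_each_max li p.1) p.2 := by
        rw [max_snoc]; simp [hfilter]
      have hstep : smallest_each_step (li.foldl smallest_each_step PySem.Dict.empty) p
          = if p.2 > smallest_each_max li p.1
            then (li.foldl smallest_each_step PySem.Dict.empty).insert p.1 p.2
            else (li.foldl smallest_each_step PySem.Dict.empty) := by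
        simp [smallest_each_step, hcont', hgetD]
      rw [hstep, if_pos hmem]
      by_cases hgt : p.2 > smallest_each_max li p.1
      · rw [if_pos hgt, PySem.Dict.items_insert_of_contains _ _ hcont', ih, List.map_map]
        apply List.map_congr_left
        intro k hk
        by_cases hkp : k = p.1
        · subst hkp
          simp [max_snoc, hfilter, max_eq_right (le_of_lt hgt)]
        · have hbe : (k == p.1) = false := by simp [hkp]
          simp only [Function.comp, hbe, Bool.false_eq_true]
          rw [max_snoc]
          simp [Ne.symm hkp]
      · rw [if_neg hgt, ih]
        apply List.map_congr_left
        intro k hk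
        by_cases hkp : k = p.1
        · subst hkp
          rw [hmax]
          simp [max_eq_left (le_of_not_gt hgt)]
        · rw [max_snoc]; simp [Ne.symm hkp]
    · -- fresh key
      have hcont' : (li.foldl smallest_each_step PySem.Dict.empty).contains p.1 = false := by
        simp [hcont, hmem]
      have hfilter : (li.filter (fun q => q.1 == p.1)) = [] := by
        rw [List.filter_eq_nil_iff]
        intro q hq hq1
        exact hmem ((mem_keys_iff li p.1).2 ⟨q, hq, by simpa using hq1⟩)
      have hstep : smallest_each_step (li.foldl smallest_each_step PySem.Dict.empty) p
          = (li.foldl smallest_each_step PySem.Dict.empty).insert p.1 p.2 := by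
        simp [smallest_each_step, hcont']
      rw [hstep, PySem.Dict.items_insert_of_not_contains _ _ hcont', ih, if_neg hmem,
        List.map_append]
      congr 1
      · apply List.map_congr_left
        intro k hk
        rw [max_snoc]
        have : p.1 ≠ k := fun h => hmem (h ▸ hk)
        simp [this]
      · simp [max_snoc, hfilter]

-- ===== VERDICT (by name: the statement is the Claim_ definition above) =====
theorem smallest_each_spec : Claim_equal_smallest_each := by
  intro li _
  unfold Spec_smallest_each smallest_each smallest_each_alt
  rw [PySem.List.slice?_none_none_neg_one, main_items]
  rfl
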